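-- pv_equiv track=rewrite | github.com/sqrtxander/aoc2023 | day14/part2.py | slide_right
-- ===== SOURCE A (Python) =====
-- def slide_right(rocks: tuple[tuple[str, ...], ...]) -> tuple[tuple[str, ...], ...]:
--     new_rocks = []
--     for col in rocks:
--         col_s = ''.join(col)
--         while 'O.' in col_s:
--             col_s = col_s.replace('O.', '.O')
--         new_rocks.append(tuple(col_s))
--
--     return tuple(new_rocks)
-- ===== SOURCE B (Python) =====
-- def slide_right(rocks):
--     new_rocks = []
--     for col in rocks:
--         pieces = []
--         dots = 0
--         os = 0
--         for c in ''.join(col):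
--             if c == '.':
--                 dots += 1
--             elif c == 'O':
--                 os += 1
--             else:
--                 pieces.append('.' * dots + 'O' * os)
--                 pieces.append(c)
--                 dots = 0
--                 os = 0
--         pieces.append('.' * dots + 'O' * os)
--         new_rocks.append(tuple(''.join(pieces)))
--     return tuple(new_rocks)
-- ===== Notes on version B (the rewrite author's own statement) =====
-- stated objective: alternative
-- what changed: Replaces A's repeat-whole-string replace('O.','.O')-until-fixpoint loop with a single scan per row that counts '.' and 'O' between blocking characters and emits the dots then the O's.
import Mathlib
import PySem

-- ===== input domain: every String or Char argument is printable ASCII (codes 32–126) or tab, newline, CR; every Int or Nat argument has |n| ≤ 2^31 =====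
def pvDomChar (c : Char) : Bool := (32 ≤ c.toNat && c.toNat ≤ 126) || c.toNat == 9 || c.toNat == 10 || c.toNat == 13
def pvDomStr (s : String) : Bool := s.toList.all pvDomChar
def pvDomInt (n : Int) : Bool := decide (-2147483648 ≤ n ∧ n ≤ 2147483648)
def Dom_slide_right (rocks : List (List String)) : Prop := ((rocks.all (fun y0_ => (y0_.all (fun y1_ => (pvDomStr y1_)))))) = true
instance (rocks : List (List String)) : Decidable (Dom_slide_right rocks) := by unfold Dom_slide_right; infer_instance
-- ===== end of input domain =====

-- B replaces A's repeat-replace('O.','.O')-until-fixpoint loop by a single scan per row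
-- that counts '.' and 'O' between blocking characters and emits the dots then the 'O's.


-- ===== PORT A =====
-- helpers the port needs for its termination argument:
-- pvFstep is ONE pass of s.replace('O.', '.O'); pvMu counts ('O' before '.') inversions.
def pvFstep : List Char → List Char
  | [] => []
  | [c] => [c]
  | c :: d :: t => if c = 'O' ∧ d = '.' then '.' :: 'O' :: pvFstep t else c :: pvFstep (d :: t)

def pvMu : List Char → Nat
  | [] => 0
  | c :: t => (if c = 'O' then t.count '.' else 0) + pvMu t

theorem pvGo_eq (fuel : Nat) : ∀ (l acc : List Char), l.length ≤ fuel →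
    PySem.Chars.replace.go ['O', '.'] ['.', 'O'] fuel l acc = acc.reverse ++ pvFstep l := by
  induction fuel with
  | zero =>
    intro l acc h
    cases l with
    | nil => simp [PySem.Chars.replace.go, pvFstep]
    | cons c t => simp at h
  | succ n ih =>
    intro l acc h
    match l with
    | [] => simp [PySem.Chars.replace.go, pvFstep]
    | [c] =>
      have hpre : List.isPrefixOf ['O', '.'] [c] = false := by
        simp [List.isPrefixOf]
      simp only [PySem.Chars.replace.go, hpre, Bool.false_eq_true, if_false]
      rw [ih [] (c :: acc) (by simp)]
      simp [pvFstep]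
    | c :: d :: t =>
      by_cases hp : c = 'O' ∧ d = '.'
      · obtain ⟨hc, hd⟩ := hp
        subst hc; subst hd
        have hpre : List.isPrefixOf ['O', '.'] ('O' :: '.' :: t) = true := by
          simp [List.isPrefixOf]
        simp only [PySem.Chars.replace.go, hpre, if_true]
        have hih := ih t (['.', 'O'].reverse ++ acc) (by simp at h ⊢; omega)
        simpa [pvFstep] using hih
      · have hpre : List.isPrefixOf ['O', '.'] (c :: d :: t) = false := by
          simp [List.isPrefixOf]
          intro hc hd
          exact hp ⟨hc.symm, hd.symm⟩
        simp only [PySem.Chars.replace.go, hpre, Bool.false_eq_true, if_false]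
        rw [ih (d :: t) (c :: acc) (by simp at h ⊢; omega)]
        simp [pvFstep, hp]

theorem pvReplace_eq (s : List Char) :
    PySem.Chars.replace s ['O', '.'] ['.', 'O'] = pvFstep s := by
  rw [PySem.Chars.replace]
  simpa using pvGo_eq s.length s [] le_rfl

theorem pvFstep_perm (s : List Char) : List.Perm (pvFstep s) s := by
  induction s using pvFstep.induct with
  | case1 => simp [pvFstep]
  | case2 c => simp [pvFstep]
  | case3 c d t h ih =>
    obtain ⟨hc, hd⟩ := h; subst hc; subst hd
    simp only [pvFstep, and_self, if_true]
    exact ((ih.cons 'O').cons '.').trans (List.Perm.swap 'O' '.' t)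
  | case4 c d t h ih =>
    simp only [pvFstep, if_neg h]
    exact ih.cons c

theorem pvCount_fstep (s : List Char) (a : Char) : (pvFstep s).count a = s.count a :=
  (pvFstep_perm s).count_eq a

theorem pvMu_fstep_le (s : List Char) : pvMu (pvFstep s) ≤ pvMu s := by
  induction s using pvFstep.induct with
  | case1 => simp [pvFstep]
  | case2 c => simp [pvFstep]
  | case3 c d t h ih =>
    obtain ⟨hc, hd⟩ := h; subst hc; subst hd
    have h1 := pvCount_fstep t '.'
    simp [pvFstep, pvMu]
    omega
  | case4 c d t h ih =>
    simp only [pvFstep, if_neg h]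
    have h2 := pvCount_fstep (d :: t) '.'
    have e1 : pvMu (c :: pvFstep (d :: t)) =
        (if c = 'O' then (pvFstep (d :: t)).count '.' else 0) + pvMu (pvFstep (d :: t)) := rfl
    have e2 : pvMu (c :: d :: t) =
        (if c = 'O' then (d :: t).count '.' else 0) + pvMu (d :: t) := rfl
    rw [e1, e2, h2]
    split_ifs <;> omega

theorem pvInfix_tail {c d : Char} {t : List Char} (h : ['O', '.'] <:+: (c :: d :: t))
    (hp : ¬(c = 'O' ∧ d = '.')) : ['O', '.'] <:+: (d :: t) := by
  obtain ⟨p, q, hpq⟩ := h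
  match p with
  | [] => simp at hpq; exact absurd ⟨hpq.1.symm, hpq.2.1.symm⟩ hp
  | x :: p' =>
    refine ⟨p', q, ?_⟩
    simpa using congrArg List.tail hpq

theorem pvMu_fstep_lt (s : List Char) (h : PySem.Chars.isIn ['O', '.'] s = true) :
    pvMu (pvFstep s) < pvMu s := by
  rw [PySem.Chars.isIn_iff_infix] at h
  induction s using pvFstep.induct with
  | case1 => obtain ⟨p, q, hpq⟩ := h; simp at hpq
  | case2 c =>
    obtain ⟨p, q, hpq⟩ := h
    have := congrArg List.length hpq; simp at this; omega
  | case3 c d t hcd ih =>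
    obtain ⟨hc, hd⟩ := hcd; subst hc; subst hd
    have h1 := pvMu_fstep_le t
    have h2 := pvCount_fstep t '.'
    simp [pvFstep, pvMu]
    omega
  | case4 c d t hcd ih =>
    have h' := pvInfix_tail h hcd
    simp only [pvFstep, if_neg hcd]
    have h1 := ih h'
    have h2 := pvCount_fstep (d :: t) '.'
    have e1 : pvMu (c :: pvFstep (d :: t)) =
        (if c = 'O' then (pvFstep (d :: t)).count '.' else 0) + pvMu (pvFstep (d :: t)) := rfl
    have e2 : pvMu (c :: d :: t) =
        (if c = 'O' then (d :: t).count '.' else 0) + pvMu (d :: t) := rfl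
    rw [e1, e2, h2]
    split_ifs <;> omega

-- the while loop of A: while 'O.' in col_s: col_s = col_s.replace('O.', '.O')
def pvSlideLoop (s : List Char) : List Char :=
  if PySem.Chars.isIn ['O', '.'] s = true then
    pvSlideLoop (PySem.Chars.replace s ['O', '.'] ['.', 'O'])
  else s
termination_by pvMu s
decreasing_by rw [pvReplace_eq]; exact pvMu_fstep_lt _ (by assumption)

def slide_right (rocks : List (List String)) : List (List String) :=
  rocks.map (fun col =>
    (pvSlideLoop (PySem.Chars.join [] (col.map String.toList))).map (fun c => String.ofList [c]))

-- ===== PORT B =====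
-- '.' * dots + 'O' * os
def pvRep (dots os : Nat) : List Char := List.replicate dots '.' ++ List.replicate os 'O'

-- B's single scan over the joined column, carrying the counts of '.' and 'O' seen
-- since the last blocking character (pieces-then-join is concatenation).
def pvScan : List Char → Nat → Nat → List Char
  | [], dots, os => pvRep dots os
  | c :: t, dots, os =>
    if c = '.' then pvScan t (dots + 1) os
    else if c = 'O' then pvScan t dots (os + 1)
    else pvRep dots os ++ c :: pvScan t 0 0

def slide_right_alt (rocks : List (List String)) : List (List String) :=
  rocks.map (fun col =>
    (pvScan (PySem.Chars.join [] (col.map String.toList)) 0 0).map (fun c => String.ofList [c]))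

-- ===== PRECONDITION & SPEC =====
def Spec_slide_right (rocks : List (List String)) (out : List (List String)) : Prop := out = slide_right_alt rocks
instance (rocks : List (List String)) (out : List (List String)) : Decidable (Spec_slide_right rocks out) := by unfold Spec_slide_right; infer_instance

-- ===== CLAIM (what is proved, stated in full; the proofs are below) =====
def Claim_equal_slide_right : Prop := ∀ (rocks : List (List String)), Dom_slide_right rocks → Spec_slide_right rocks (slide_right rocks)

-- ===== LEMMAS AND PROOFS =====

-- pvScan is invariant under one replace pass
theorem pvScan_fstep (s : List Char) : ∀ dd oo, pvScan (pvFstep s) dd oo = pvScan s dd oo := by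
  induction s using pvFstep.induct with
  | case1 => intro dd oo; simp [pvFstep]
  | case2 c => intro dd oo; simp [pvFstep]
  | case3 c d t h ih =>
    obtain ⟨hc, hd⟩ := h; subst hc; subst hd
    intro dd oo
    simp [pvFstep, pvScan, ih]
  | case4 c d t h ih =>
    intro dd oo
    have e : ∀ (X : List Char), pvScan (c :: X) dd oo =
        if c = '.' then pvScan X (dd + 1) oo
        else if c = 'O' then pvScan X dd (oo + 1)
        else pvRep dd oo ++ c :: pvScan X 0 0 := fun X => rfl
    simp only [pvFstep, if_neg h, e]
    split_ifs <;> simp [ih]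

-- when s has no 'O.' left, the scan reproduces rep dots os ++ s verbatim
theorem pvScan_id (s : List Char) : ∀ dd oo, ¬(['O', '.'] <:+: (pvRep dd oo ++ s)) →
    pvScan s dd oo = pvRep dd oo ++ s := by
  induction s with
  | nil => intro dd oo _; simp [pvScan]
  | cons c t ih =>
    intro dd oo h
    by_cases hc : c = '.'
    · subst hc
      match oo with
      | 0 =>
        have hrw : pvRep (dd + 1) 0 ++ t = pvRep dd 0 ++ '.' :: t := by
          simp [pvRep, List.replicate_succ']
        simp only [pvScan]
        rw [ih (dd + 1) 0 (by rw [hrw]; exact h), hrw]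
        simp
      | oo' + 1 =>
        exfalso
        apply h
        exact ⟨List.replicate dd '.' ++ List.replicate oo' 'O', t, by
          simp [pvRep, List.replicate_succ']⟩
    · by_cases ho : c = 'O'
      · subst ho
        have hrw : pvRep dd (oo + 1) ++ t = pvRep dd oo ++ 'O' :: t := by
          simp [pvRep, List.replicate_succ']
        simp only [pvScan]
        rw [ih dd (oo + 1) (by rw [hrw]; exact h), hrw]
        simp
      · simp only [pvScan, if_neg hc, if_neg ho]
        have ht : ¬(['O', '.'] <:+: t) := by
          intro hinf
          exact h (hinf.trans ⟨pvRep dd oo ++ [c], by simp⟩)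
        rw [ih 0 0 (by simpa [pvRep] using ht)]
        simp [pvRep]

theorem pvLoop_eq_scan (s : List Char) : pvSlideLoop s = pvScan s 0 0 := by
  induction s using pvSlideLoop.induct with
  | case1 s h ih =>
    rw [pvSlideLoop, if_pos h, ih, pvReplace_eq, pvScan_fstep]
  | case2 s h =>
    rw [pvSlideLoop, if_neg h]
    have h' : ¬(['O', '.'] <:+: s) := by
      intro hinf
      exact h ((PySem.Chars.isIn_iff_infix _ _).mpr hinf)
    rw [pvScan_id s 0 0 (by simpa [pvRep] using h')]
    simp [pvRep]

-- ===== VERDICT (by name: the statement is the Claim_ definition above) =====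
theorem slide_right_spec : Claim_equal_slide_right := by
  intro rocks _
  unfold Spec_slide_right slide_right slide_right_alt
  simp only [pvLoop_eq_scan]
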